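-- pv_equiv track=rewrite | github.com/gan-ta/Algorithm | programmers/Kakao/수식 최대화.py | multi_operation
-- ===== SOURCE A (Python) =====
-- def multi_operation(numbers,operators):
--     re_numbers = [numbers[0]]
--
--     for i in range(1,len(numbers)):
--         if operators[i-1] != '*':
--             re_numbers.append(numbers[i])
--         else:
--             re_numbers[len(re_numbers) - 1] = \
--                 str(int(re_numbers[len(re_numbers) - 1]) * int(numbers[i]))
--
--     while '*' in operators:
--         operators.remove('*')
--
--     return re_numbers,operators
-- ===== SOURCE B (Python) =====
-- def _collapse(group):
--     # fold a maximal '*'-connected run into one number string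
--     acc = group[0]
--     for x in group[1:]:
--         acc = str(int(acc) * int(x))
--     return acc
--
--
-- def multi_operation(numbers, operators):
--     # partition numbers into maximal runs connected by '*'
--     groups = [[numbers[0]]]
--     for num, op in zip(numbers[1:], operators):
--         if op == '*':
--             groups[-1].append(num)
--         else:
--             groups.append([num])
--     re_numbers = [_collapse(g) for g in groups]
--     # strip all '*' operators, mutating the same list object (as A does)
--     operators[:] = [op for op in operators if op != '*']
--     return re_numbers, operators
-- ===== Notes on version B (the rewrite author's own statement) =====
-- stated objective: alternative
-- what changed: A collapses multiplications inline by repeatedly rewriting the last slot of the result list and strips '*' with a quadratic while/remove loop; B first partitions the numbers into maximal '*'-connected runs (a list of groups), then reduces each group in a second pass, and strips '*' with a single filter comprehension.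
import Mathlib
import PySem

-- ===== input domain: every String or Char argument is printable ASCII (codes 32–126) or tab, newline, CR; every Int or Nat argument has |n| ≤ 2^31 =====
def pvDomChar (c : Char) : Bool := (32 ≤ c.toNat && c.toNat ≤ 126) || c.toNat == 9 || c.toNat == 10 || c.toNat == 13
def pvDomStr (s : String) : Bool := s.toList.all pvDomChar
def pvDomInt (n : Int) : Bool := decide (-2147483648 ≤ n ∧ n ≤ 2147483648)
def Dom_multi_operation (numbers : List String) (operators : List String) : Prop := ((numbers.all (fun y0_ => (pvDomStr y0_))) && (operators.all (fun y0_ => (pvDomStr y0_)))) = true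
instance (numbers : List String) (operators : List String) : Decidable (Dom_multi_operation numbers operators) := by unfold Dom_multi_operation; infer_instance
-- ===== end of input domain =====

-- B replaces A's inline collapse-into-last-slot pass by partition-into-'*'-runs then reduce-each-run,
-- and A's quadratic while/remove stripping of '*' by a single filter (alternative decomposition; both
-- mutate the Python operators list the same way, so return-value equivalence covers the side effect).


-- ===== PORT A =====
-- `while '*' in operators: operators.remove('*')`
def removeStarsWhile (ops : List String) : List String :=
  match h : PySem.List.remove? ops "*" with
  | some ops' => removeStarsWhile ops'
  | none => ops
termination_by ops.length
decreasing_by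
  have hm : "*" ∈ ops := by
    by_contra hn
    rw [(PySem.List.remove?_eq_none_iff ops "*").mpr hn] at h
    cases h
  rw [PySem.List.remove?_eq_some_erase ops "*" hm] at h
  cases h
  have := List.length_erase_of_mem hm
  have := List.length_pos_of_mem hm
  omega

def multi_operation (numbers : List String) (operators : List String) : List String × List String :=
  let re_numbers := (PySem.List.pyRange 1 (PySem.List.len numbers) 1).foldl
    (fun re i =>
      if PySem.List.pyGetD operators (i - 1) "" ≠ "*" then
        re ++ [PySem.List.pyGetD numbers i ""]
      else
        -- re[len(re)-1] = str(int(re[len(re)-1]) * int(numbers[i]))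
        PySem.List.pySetD re (PySem.List.len re - 1)
          (PySem.Int.toStr
            ((PySem.Int.ofStr? (PySem.List.pyGetD re (PySem.List.len re - 1) "")).getD 0 *
             (PySem.Int.ofStr? (PySem.List.pyGetD numbers i "")).getD 0)))
    [PySem.List.pyGetD numbers 0 ""]
  (re_numbers, removeStarsWhile operators)

-- ===== PORT B =====
-- `_collapse(group)`: fold `acc = str(int(acc) * int(x))` over group[1:] starting from group[0]
def pvCollapse (g : List String) : String :=
  g.tail.foldl
    (fun acc x =>
      PySem.Int.toStr ((PySem.Int.ofStr? acc).getD 0 * (PySem.Int.ofStr? x).getD 0))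
    (g.headD "")

def multi_operation_alt (numbers : List String) (operators : List String) : List String × List String :=
  -- numbers[1:] is numbers.tail (PySem.List.slice_from_one); zip stops at the shorter list
  let groups := (numbers.tail.zip operators).foldl
    (fun gs p =>
      if p.2 == "*" then gs.dropLast ++ [gs.getLast?.getD [] ++ [p.1]]
      else gs ++ [[p.1]])
    [[numbers.headD ""]]
  (groups.map pvCollapse, operators.filter (fun op => op != "*"))

-- ===== PRECONDITION & SPEC =====
-- Pre_ excludes exactly the inputs where Python A raises: empty numbers (IndexError on numbers[0]),
-- operators shorter than len(numbers)-1 (IndexError on operators[i-1]), and non-int strings adjacent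
-- to a '*' operator (ValueError in int()).
def Pre_multi_operation (numbers : List String) (operators : List String) : Prop :=
  numbers ≠ [] ∧ numbers.length ≤ operators.length + 1 ∧
  ∀ i < numbers.length - 1, operators.getD i "" = "*" →
    (PySem.Int.ofStr? (numbers.getD i "")).isSome = true ∧
    (PySem.Int.ofStr? (numbers.getD (i + 1) "")).isSome = true
instance (numbers : List String) (operators : List String) : Decidable (Pre_multi_operation numbers operators) := by unfold Pre_multi_operation; infer_instance

def pvWitness_multi_operation : List String × List String := (["2", "3", "5"], ["*", "+"])

def Spec_multi_operation (numbers : List String) (operators : List String) (out : List String × List String) : Prop := out = multi_operation_alt numbers operators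
instance (numbers : List String) (operators : List String) (out : List String × List String) : Decidable (Spec_multi_operation numbers operators out) := by unfold Spec_multi_operation; infer_instance

-- ===== CLAIM (what is proved, stated in full; the proofs are below) =====
def Claim_equal_multi_operation : Prop := ∀ (numbers : List String) (operators : List String), Dom_multi_operation numbers operators → Pre_multi_operation numbers operators → Spec_multi_operation numbers operators (multi_operation numbers operators)

-- ===== LEMMAS AND PROOFS =====

-- A's loop body as a function of the two strings it reads at step i
def pvStepA (s : List String) (num op : String) : List String :=
  if op ≠ "*" then s ++ [num]
  else PySem.List.pySetD s (PySem.List.len s - 1)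
    (PySem.Int.toStr
      ((PySem.Int.ofStr? (PySem.List.pyGetD s (PySem.List.len s - 1) "")).getD 0 *
       (PySem.Int.ofStr? num).getD 0))

-- B's loop body
def pvStepB (gs : List (List String)) (p : String × String) : List (List String) :=
  if p.2 == "*" then gs.dropLast ++ [gs.getLast?.getD [] ++ [p.1]] else gs ++ [[p.1]]

-- removing the first '*' then filtering out '*' is the same as filtering out '*'
theorem pv_filter_erase (ops : List String) :
    (ops.erase "*").filter (fun op => op != "*") = ops.filter (fun op => op != "*") := by
  induction ops with
  | nil => rfl
  | cons x rest ih =>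
    by_cases hx : x = "*"
    · subst hx
      simp [List.erase_cons_head]
    · rw [List.erase_cons_tail (by simp [hx])]
      simp [hx, ih]

-- the while/remove loop of A equals B's filter
theorem pv_removeStars_eq_filter (ops : List String) :
    removeStarsWhile ops = ops.filter (fun op => op != "*") := by
  induction hn : ops.length using Nat.strong_induction_on generalizing ops with
  | _ n ih =>
  unfold removeStarsWhile
  by_cases hm : "*" ∈ ops
  · rw [PySem.List.remove?_eq_some_erase ops "*" hm]
    have hlt : (ops.erase "*").length < n := by
      have := List.length_erase_of_mem hm
      have := List.length_pos_of_mem hm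
      omega
    show removeStarsWhile (ops.erase "*") = List.filter (fun op => op != "*") ops
    rw [ih _ hlt _ rfl, pv_filter_erase]
  · rw [(PySem.List.remove?_eq_none_iff ops "*").mpr hm]
    refine ((List.filter_eq_self).mpr ?_).symm
    intro a ha
    simp only [bne_iff_ne, ne_eq]
    intro hEq
    exact hm (hEq ▸ ha)

-- getD one past the head
theorem pv_getD_succ_tail (xs : List String) (k : Nat) (d : String) :
    xs.getD (k + 1) d = xs.tail.getD k d := by
  cases xs <;> rfl

-- replacing the last slot
theorem pv_set_last (xs : List String) (h : xs ≠ []) (v : String) :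
    xs.set (xs.length - 1) v = xs.dropLast ++ [v] := by
  induction xs with
  | nil => exact absurd rfl h
  | cons x rest ih =>
    cases rest with
    | nil => rfl
    | cons y t =>
      have : (x :: y :: t).length - 1 = (y :: t).length - 1 + 1 := by
        simp
      rw [this, List.set_cons_succ, ih (by simp)]
      rfl

-- reading the last slot through pyGetD
theorem pv_pyGetD_last (xs : List String) (h : xs ≠ []) :
    PySem.List.pyGetD xs (PySem.List.len xs - 1) "" = xs.getLast h := by
  have hl : 0 < xs.length := List.length_pos_iff.mpr h
  have hcast : PySem.List.len xs - 1 = ((xs.length - 1 : Nat) : Int) := by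
    simp; omega
  rw [hcast, PySem.List.pyGetD_natCast,
    List.getD_eq_getElem _ _ (by omega), List.getLast_eq_getElem]

-- writing the last slot through pySetD
theorem pv_pySetD_last (xs : List String) (h : xs ≠ []) (v : String) :
    PySem.List.pySetD xs (PySem.List.len xs - 1) v = xs.dropLast ++ [v] := by
  have hl : 0 < xs.length := List.length_pos_iff.mpr h
  have hcast : PySem.List.len xs - 1 = ((xs.length - 1 : Nat) : Int) := by
    simp; omega
  rw [hcast, PySem.List.pySetD_natCast, pv_set_last xs h v]

-- collapsing a run grown by one element
theorem pv_collapse_snoc (g : List String) (h : g ≠ []) (x : String) :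
    pvCollapse (g ++ [x]) =
      PySem.Int.toStr
        ((PySem.Int.ofStr? (pvCollapse g)).getD 0 * (PySem.Int.ofStr? x).getD 0) := by
  cases g with
  | nil => exact absurd rfl h
  | cons a t =>
    simp [pvCollapse, List.foldl_append]

-- one step of A on collapsed state = collapse of one step of B
theorem pv_step_eq (gs : List (List String)) (hne : gs ≠ []) (hall : ∀ g ∈ gs, g ≠ [])
    (num op : String) :
    pvStepA (gs.map pvCollapse) num op = (pvStepB gs (num, op)).map pvCollapse := by
  by_cases hop : op = "*"
  · subst hop
    have hne' : gs.map pvCollapse ≠ [] := by simpa using hne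
    obtain ⟨L, hL⟩ : ∃ L, gs.getLast? = some L := ⟨gs.getLast hne, List.getLast?_eq_some_getLast hne⟩
    have hLmem : L ∈ gs := List.mem_of_getLast? hL
    have hLne : L ≠ [] := hall L hLmem
    have hlast : (gs.map pvCollapse).getLast hne' = pvCollapse L := by
      have h2 := List.getLast?_eq_some_getLast hne'
      rw [List.getLast?_map, hL] at h2
      exact (Option.some_injective _ h2.symm)
    simp only [pvStepA, pvStepB]
    rw [if_neg (show ¬ (("*" : String) ≠ "*") by simp),
      if_pos (show (("*" : String) == "*") = true by simp)]
    rw [pv_pySetD_last _ hne', pv_pyGetD_last _ hne', hlast,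
      List.map_append, ← List.map_dropLast, hL]
    simp [pv_collapse_snoc L hLne num]
  · simp only [pvStepA, pvStepB]
    rw [if_pos hop, if_neg (by simpa using hop)]
    simp [pvCollapse]

-- the invariant carried through the common zip fold
theorem pv_fold_collapse (ps : List (String × String)) :
    ∀ (gs : List (List String)), gs ≠ [] → (∀ g ∈ gs, g ≠ []) →
    ps.foldl (fun s p => pvStepA s p.1 p.2) (gs.map pvCollapse)
      = (ps.foldl pvStepB gs).map pvCollapse := by
  induction ps with
  | nil => intro gs _ _; rfl
  | cons p rest ih =>
    intro gs hne hall
    simp only [List.foldl_cons]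
    rw [pv_step_eq gs hne hall p.1 p.2]
    apply ih
    · unfold pvStepB; split <;> simp
    · intro g hg
      unfold pvStepB at hg
      split at hg
      · rcases List.mem_append.mp hg with h1 | h1
        · exact hall g (List.dropLast_subset gs h1)
        · simp at h1; subst h1; simp
      · rcases List.mem_append.mp hg with h1 | h1
        · exact hall g h1
        · simp at h1; subst h1; simp

-- A's index fold over range(1, len(numbers)) rewritten as a fold over zip(numbers[1:], operators)
theorem pv_range_to_zip {σ : Type} (step : σ → String → String → σ) :
    ∀ (ns ops : List String) (init : σ), ns.length ≤ ops.length →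
    (List.range ns.length).foldl (fun s k => step s (ns.getD k "") (ops.getD k "")) init
      = (ns.zip ops).foldl (fun s p => step s p.1 p.2) init := by
  intro ns
  induction ns with
  | nil => intro ops init _; rfl
  | cons x t ih =>
    intro ops init hlen
    cases ops with
    | nil => simp at hlen
    | cons o ops' =>
      rw [List.length_cons, List.range_succ_eq_map, List.foldl_cons, List.foldl_map]
      simp only [List.getD_cons_zero, Nat.succ_eq_add_one, List.getD_cons_succ]
      rw [ih ops' (step init x o) (by simpa using hlen)]
      rfl

-- ===== VERDICT (by name: the statement is the Claim_ definition above) =====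
theorem multi_operation_spec : Claim_equal_multi_operation := by
  intro numbers operators _ hpre
  obtain ⟨hne, hlen, _⟩ := hpre
  unfold Spec_multi_operation multi_operation multi_operation_alt
  refine Prod.ext ?_ ?_
  · -- first component
    show ((PySem.List.pyRange 1 (PySem.List.len numbers) 1).foldl
        (fun re i => pvStepA re (PySem.List.pyGetD numbers i "") (PySem.List.pyGetD operators (i - 1) ""))
        [PySem.List.pyGetD numbers 0 ""])
      = ((numbers.tail.zip operators).foldl pvStepB [[numbers.headD ""]]).map pvCollapse
    obtain ⟨x, t, rfl⟩ : ∃ x t, numbers = x :: t := by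
      cases numbers with
      | nil => exact absurd rfl hne
      | cons a b => exact ⟨a, b, rfl⟩
    have h0 : PySem.List.pyGetD (x :: t) 0 "" = x := PySem.List.pyGetD_zero_cons x t ""
    rw [h0]
    have hrange : PySem.List.pyRange 1 (PySem.List.len (x :: t)) 1
        = (List.range t.length).map (fun k : Nat => (1 : Int) + k) := by
      rw [PySem.List.pyRange_one]
      norm_num
    rw [hrange, List.foldl_map]
    have hcongr := PySem.List.foldl_congr_mem (List.range t.length)
      (fun (s : List String) (k : Nat) =>
        pvStepA s (PySem.List.pyGetD (x :: t) ((1 : Int) + k) "")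
          (PySem.List.pyGetD operators ((1 : Int) + k - 1) ""))
      (fun s k => pvStepA s (t.getD k "") (operators.getD k "")) [x] (by
        intro s k _
        have h1 : (1 : Int) + (k : Nat) = ((k + 1 : Nat) : Int) := by push_cast; ring
        have h2 : ((k + 1 : Nat) : Int) - 1 = ((k : Nat) : Int) := by push_cast; ring
        simp only [h1, h2, PySem.List.pyGetD_natCast]
        rw [pv_getD_succ_tail]
        rfl)
    rw [hcongr,

      pv_range_to_zip pvStepA t operators [x] (by simpa using hlen),
      show ([x] : List String) = [[x]].map pvCollapse by simp [pvCollapse],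
      pv_fold_collapse _ [[x]] (by simp) (by simp)]
    rfl
  · exact pv_removeStars_eq_filter operators
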